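-- pv_equiv track=rewrite | github.com/Shimimas/Algorithms | Algorithms3/LastLections/n5.py | recursia
-- ===== SOURCE A (Python) =====
-- def recursia(array):
--     if len(array) <= 1:
--         return 0
--     min = array[0]
--     min_idx = 0
--     for i in range(1, len(array)):
--         if array[i] < min:
--             min = array[i]
--             min_idx = i
--     res = min * (len(array) - 1)
--     new_ar = []
--     for i in range(len(array)):
--         array[i] -= min
--         if array[i] == 0:
--             res += recursia(new_ar)
--             new_ar.clear()
--         else:
--             new_ar.append(array[i])
--     res += recursia(new_ar)
--     return res
-- ===== SOURCE B (Python) =====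
-- def recursia(array):
--     # One pass: the recursive min-subtract-and-split computes exactly the
--     # sum of min(array[i], array[i+1]) over adjacent pairs.
--     # (A mutates its argument in place; B does not. Return values agree.)
--     return sum(min(x, y) for x, y in zip(array, array[1:]))
-- ===== Notes on version B (the rewrite author's own statement) =====
-- stated objective: faster
-- what changed: Replaces the recursive min-subtract-and-split-at-zeros algorithm by a single pass summing min of each adjacent pair, which is provably the same value.
import Mathlib
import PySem

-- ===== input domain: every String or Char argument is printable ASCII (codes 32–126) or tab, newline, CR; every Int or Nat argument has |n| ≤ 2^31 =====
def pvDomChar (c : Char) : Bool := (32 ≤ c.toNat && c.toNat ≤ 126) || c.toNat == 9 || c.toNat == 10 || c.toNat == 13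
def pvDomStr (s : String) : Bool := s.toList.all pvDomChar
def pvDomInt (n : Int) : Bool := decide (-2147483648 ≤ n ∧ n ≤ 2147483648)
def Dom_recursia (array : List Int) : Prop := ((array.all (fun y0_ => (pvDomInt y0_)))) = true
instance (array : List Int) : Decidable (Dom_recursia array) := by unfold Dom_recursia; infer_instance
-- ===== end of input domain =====

-- B replaces A's recursive min-subtract-and-split-at-zeros algorithm by a single pass
-- summing min of each adjacent pair (provably the same value; asymptotically faster).
-- Python A mutates its argument in place (subtracts the minimum); B does not.
-- The equivalence proved here is about the return value only.

-- ===== PORT A =====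
-- Literal port of A.  `fuel` is a totality guard only: fuel = array.length always
-- suffices (each recursive call receives a strictly shorter list, proved below).
-- A's variable `min_idx` is assigned but never read; it is omitted from the fold state.
def recursiaGo : Nat → List Int → Int
  | 0, _ => 0
  | fuel+1, array =>
    if array.length ≤ 1 then 0
    else
      -- min loop over range(1, len(array))
      let mp := array.tail.foldl (fun acc x => if x < acc then x else acc) array.headI
      -- second loop: state (res, new_ar); array[i] -= min; split at zeros
      let p := array.foldl
        (fun (st : Int × List Int) x =>
          let y := x - mp
          if y = 0 then (st.1 + recursiaGo fuel st.2, [])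
          else (st.1, st.2 ++ [y]))
        (mp * ((array.length : Int) - 1), [])
      p.1 + recursiaGo fuel p.2

def recursia (array : List Int) : Int := recursiaGo array.length array

-- ===== PORT B =====
-- Port of Source B: sum(min(x, y) for x, y in zip(array, array[1:]))
def recursia_alt (array : List Int) : Int :=
  (array.zip array.tail).foldl (fun s q => s + min q.1 q.2) 0

-- ===== PRECONDITION & SPEC =====
def Spec_recursia (array : List Int) (out : Int) : Prop := out = recursia_alt array
instance (array : List Int) (out : Int) : Decidable (Spec_recursia array out) := by unfold Spec_recursia; infer_instance

-- ===== CLAIM (what is proved, stated in full; the proofs are below) =====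
def Claim_equal_recursia : Prop := ∀ (array : List Int), Dom_recursia array → Spec_recursia array (recursia array)

-- ===== LEMMAS AND PROOFS =====

-- sum of min of adjacent pairs, the common value of both ports
def adjSum : List Int → Int
  | [] => 0
  | [_] => 0
  | a :: b :: t => min a b + adjSum (b :: t)

lemma alt_foldl_eq (l : List Int) :
    ∀ s : Int, (l.zip l.tail).foldl (fun s q => s + min q.1 q.2) s = s + adjSum l := by
  induction l with
  | nil => intro s; simp [adjSum]
  | cons a l ih =>
    intro s
    cases l with
    | nil => simp [adjSum]
    | cons b t =>
      simp only [List.tail_cons, List.zip_cons_cons, List.foldl_cons]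
      simp only [List.tail_cons] at ih
      rw [ih (s + min a b)]
      simp [adjSum]; ring

lemma foldMin_le_init : ∀ (xs : List Int) (a : Int),
    xs.foldl (fun acc x => if x < acc then x else acc) a ≤ a := by
  intro xs
  induction xs with
  | nil => intro a; simp
  | cons x xs ih =>
    intro a
    simp only [List.foldl_cons]
    by_cases hxa : x < a
    · rw [if_pos hxa]; have := ih x; omega
    · rw [if_neg hxa]; have := ih a; omega

lemma foldMin_le_mem : ∀ (xs : List Int) (a x : Int), x ∈ xs →
    xs.foldl (fun acc x => if x < acc then x else acc) a ≤ x := by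
  intro xs
  induction xs with
  | nil => intro a x hx; cases hx
  | cons y ys ih =>
    intro a x hx
    simp only [List.foldl_cons]
    rcases List.mem_cons.mp hx with h | h
    · subst h
      by_cases hxa : x < a
      · rw [if_pos hxa]; have := foldMin_le_init ys x; omega
      · rw [if_neg hxa]; have := foldMin_le_init ys a; omega
    · exact ih _ x h

lemma foldMin_mem : ∀ (xs : List Int) (a : Int),
    xs.foldl (fun acc x => if x < acc then x else acc) a = a ∨
    xs.foldl (fun acc x => if x < acc then x else acc) a ∈ xs := by
  intro xs
  induction xs with
  | nil => intro a; left; simp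
  | cons x xs ih =>
    intro a
    simp only [List.foldl_cons]
    rcases ih (if x < a then x else a) with h | h
    · rw [h]; split_ifs
      · right; exact List.mem_cons_self
      · left; rfl
    · right; exact List.mem_cons_of_mem _ h

lemma adjSum_shift (m : Int) : ∀ l : List Int, l ≠ [] →
    adjSum (l.map (· - m)) = adjSum l - m * ((l.length : Int) - 1) := by
  intro l
  induction l with
  | nil => intro h; exact absurd rfl h
  | cons a l ih =>
    intro _
    cases l with
    | nil => simp [adjSum]
    | cons b t =>
      have hb : (b :: t) ≠ [] := by simp
      simp only [List.map_cons, adjSum, List.length_cons]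
      have ih' := ih hb
      simp only [List.map_cons, List.length_cons] at ih'
      rw [ih']
      have hmin : min (a - m) (b - m) = min a b - m := by
        simp only [min_def]; split_ifs <;> omega
      rw [hmin]
      push_cast
      ring

lemma adjSum_append_cons : ∀ (xs : List Int) (y : Int) (ys : List Int),
    adjSum (xs ++ y :: ys) = adjSum (xs ++ [y]) + adjSum (y :: ys) := by
  intro xs
  induction xs with
  | nil => intro y ys; simp [adjSum]
  | cons a xs ih =>
    intro y ys
    cases xs with
    | nil => simp [adjSum]
    | cons b t =>
      simp only [List.cons_append, adjSum]
      have := ih y ys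
      simp only [List.cons_append] at this ⊢
      rw [this]; ring

lemma adjSum_append_zero : ∀ (acc : List Int), (∀ x ∈ acc, 0 < x) →
    adjSum (acc ++ [0]) = adjSum acc := by
  intro acc
  induction acc with
  | nil => intro _; simp [adjSum]
  | cons a l ih =>
    intro h
    cases l with
    | nil =>
      have ha : 0 < a := h a List.mem_cons_self
      simp [adjSum, min_def]
      omega
    | cons b t =>
      simp only [List.cons_append, adjSum]
      have := ih (fun x hx => h x (List.mem_cons_of_mem _ hx))
      simp only [List.cons_append] at this ⊢
      rw [this]

lemma adjSum_zero_cons : ∀ (rest : List Int), (∀ x ∈ rest, 0 ≤ x) →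
    adjSum (0 :: rest) = adjSum rest := by
  intro rest h
  cases rest with
  | nil => simp [adjSum]
  | cons r t =>
    have : (0 : Int) ≤ r := h r List.mem_cons_self
    simp [adjSum, this]

-- the body of A's second loop, named for the proofs (defeq to the lambda in the port)
def stepFn (fuel : Nat) (mp : Int) (st : Int × List Int) (x : Int) : Int × List Int :=
  let y := x - mp
  if y = 0 then (st.1 + recursiaGo fuel st.2, []) else (st.1, st.2 ++ [y])

lemma loop_lem (fuel : Nat) (mp : Int)
    (Hgo : ∀ l : List Int, l.length ≤ fuel → recursiaGo fuel l = adjSum l) :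
    ∀ (b acc : List Int) (res : Int),
      (∀ x ∈ acc, 0 < x) → (∀ x ∈ b, mp ≤ x) →
      acc.length + b.length ≤ fuel + 1 →
      (mp ∈ b ∨ acc.length + b.length ≤ fuel) →
      (b.foldl (stepFn fuel mp) (res, acc)).1
        + recursiaGo fuel (b.foldl (stepFn fuel mp) (res, acc)).2
      = res + adjSum (acc ++ b.map (· - mp)) := by
  intro b
  induction b with
  | nil =>
    intro acc res hacc _ _ hdisj
    have hlen : acc.length ≤ fuel := by
      rcases hdisj with h | h
      · cases h
      · simpa using h
    simp [Hgo acc hlen]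
  | cons x b ih =>
    intro acc res hacc hb hlen hdisj
    simp only [List.foldl_cons]
    by_cases hx : x - mp = 0
    · rw [show stepFn fuel mp (res, acc) x = (res + recursiaGo fuel acc, []) by
        simp [stepFn, hx]]
      have haccf : acc.length ≤ fuel := by
        simp only [List.length_cons] at hlen; omega
      rw [Hgo acc haccf]
      rw [ih [] (res + adjSum acc) (by simp) (fun z hz => hb z (List.mem_cons_of_mem _ hz))
        (by simp only [List.length_nil, List.length_cons] at hlen ⊢; omega)
        (Or.inr (by simp only [List.length_nil, List.length_cons] at hlen ⊢; omega))]
      have hx0 : x - mp = 0 := hx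
      have hrest : ∀ z ∈ b.map (· - mp), (0:Int) ≤ z := by
        intro z hz
        rcases List.mem_map.mp hz with ⟨w, hw, rfl⟩
        have := hb w (List.mem_cons_of_mem _ hw)
        omega
      simp only [List.map_cons, hx0, List.nil_append]
      rw [adjSum_append_cons acc 0 (b.map (· - mp)), adjSum_append_zero acc hacc,
        adjSum_zero_cons _ hrest]
      ring
    · rw [show stepFn fuel mp (res, acc) x = (res, acc ++ [x - mp]) by
        simp [stepFn, hx]]
      have hxpos : 0 < x - mp := by
        have := hb x List.mem_cons_self; omega
      rw [ih (acc ++ [x - mp]) res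
        (by intro z hz
            rcases List.mem_append.mp hz with h | h
            · exact hacc z h
            · simp at h; omega)
        (fun z hz => hb z (List.mem_cons_of_mem _ hz))
        (by simp only [List.length_append, List.length_nil, List.length_cons] at hlen ⊢; omega)
        (by rcases hdisj with h | h
            · rcases List.mem_cons.mp h with h1 | h1
              · omega
              · exact Or.inl h1
            · right
              simp only [List.length_append, List.length_nil, List.length_cons] at h ⊢
              omega)]
      simp only [List.map_cons, List.append_assoc, List.singleton_append]

lemma go_eq_adjSum : ∀ (fuel : Nat) (l : List Int), l.length ≤ fuel →
    recursiaGo fuel l = adjSum l := by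
  intro fuel
  induction fuel with
  | zero =>
    intro l hl
    have : l = [] := List.eq_nil_of_length_eq_zero (Nat.le_zero.mp hl)
    subst this; rfl
  | succ fuel ih =>
    intro l hl
    by_cases h1 : l.length ≤ 1
    · rw [show recursiaGo (fuel+1) l = 0 by simp [recursiaGo, h1]]
      match l, h1 with
      | [], _ => rfl
      | [a], _ => rfl
    · obtain ⟨a, t, rfl⟩ : ∃ a t, l = a :: t := by
        cases l with
        | nil => simp at h1
        | cons a t => exact ⟨a, t, rfl⟩
      set mp := t.foldl (fun acc x => if x < acc then x else acc) a with hmp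
      have hle : ∀ x ∈ a :: t, mp ≤ x := by
        intro x hx
        rcases List.mem_cons.mp hx with rfl | hx
        · exact foldMin_le_init t x
        · exact foldMin_le_mem t a x hx
      have hmem : mp ∈ a :: t := by
        rcases foldMin_mem t a with h | h
        · have hma : mp = a := by rw [hmp, h]
          rw [hma]; exact List.mem_cons_self
        · exact List.mem_cons_of_mem _ h
      have hgo : recursiaGo (fuel+1) (a :: t)
          = ((a :: t).foldl (stepFn fuel mp) (mp * (((a :: t).length : Int) - 1), [])).1
            + recursiaGo fuel ((a :: t).foldl (stepFn fuel mp) (mp * (((a :: t).length : Int) - 1), [])).2 := by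
        rw [show recursiaGo (fuel+1) (a :: t) =
          (if (a :: t).length ≤ 1 then 0
           else
             let mp' := (a :: t).tail.foldl (fun acc x => if x < acc then x else acc) (a :: t).headI
             let p := (a :: t).foldl
               (fun (st : Int × List Int) x =>
                 let y := x - mp'
                 if y = 0 then (st.1 + recursiaGo fuel st.2, [])
                 else (st.1, st.2 ++ [y]))
               (mp' * (((a :: t).length : Int) - 1), [])
             p.1 + recursiaGo fuel p.2) from rfl]
        rw [if_neg h1]
        rfl
      rw [hgo]
      rw [loop_lem fuel mp ih (a :: t) [] _ (by simp) hle
        (by simpa using hl) (Or.inl hmem)]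
      rw [show ([] : List Int) ++ (a :: t).map (· - mp) = (a :: t).map (· - mp) from rfl]
      rw [adjSum_shift mp (a :: t) (by simp)]
      ring

-- ===== VERDICT (by name: the statement is the Claim_ definition above) =====
theorem recursia_spec : Claim_equal_recursia := by
  intro array _
  unfold Spec_recursia recursia recursia_alt
  rw [go_eq_adjSum array.length array le_rfl, alt_foldl_eq array 0]
  ring
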